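-- pv_equiv track=rewrite | github.com/kevindurr/MOOCs | gtx/Data Structures/Final/6.py | abstract_names
-- ===== SOURCE A (Python) =====
-- def abstract_names(listOfLists):
--     myDict = {}
--     for lists in listOfLists:
--         for names in lists:
--             name = names.split()
--             if name[0] not in myDict:
--                 myDict[name[0]] = []
--             myDict[name[0]].append(name[1])
--     for value in myDict.values():
--         value.sort()
--     return myDict
-- ===== SOURCE B (Python) =====
-- def abstract_names(listOfLists):
--     # Flatten once, compute first-appearance key order, then build each group
--     # by a per-key filter over the flat list, sorting the whole group at once.
--     pairs = [name.split() for lists in listOfLists for name in lists]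
--     keys = list(dict.fromkeys(p[0] for p in pairs))
--     return {k: sorted(p[1] for p in pairs if p[0] == k) for k in keys}
-- ===== Notes on version B (the rewrite author's own statement) =====
-- stated objective: alternative
-- what changed: B flattens all names into one list of split tokens, derives the key list via ordered dedup (dict.fromkeys), and builds each group by a per-key filter over the flat list with one sorted() per group, replacing A's incremental dict construction with per-bucket in-place sorts.
import Mathlib
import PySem

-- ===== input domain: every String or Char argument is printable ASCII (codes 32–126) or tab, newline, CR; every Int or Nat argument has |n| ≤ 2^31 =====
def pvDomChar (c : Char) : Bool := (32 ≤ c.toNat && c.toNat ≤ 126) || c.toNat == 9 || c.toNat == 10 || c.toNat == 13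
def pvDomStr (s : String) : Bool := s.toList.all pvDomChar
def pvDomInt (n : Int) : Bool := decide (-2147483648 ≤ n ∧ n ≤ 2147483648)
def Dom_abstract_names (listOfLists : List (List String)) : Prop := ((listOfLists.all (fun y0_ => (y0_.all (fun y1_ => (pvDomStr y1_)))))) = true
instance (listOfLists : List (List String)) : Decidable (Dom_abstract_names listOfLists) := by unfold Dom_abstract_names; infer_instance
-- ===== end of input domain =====

-- B flattens the input once, takes keys in first-appearance order, and builds each
-- group by a per-key filter with one whole-group sort, instead of A's incremental
-- dict build with a per-bucket in-place sort (objective: alternative decomposition).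


-- ===== PORT A =====
def abstract_names (listOfLists : List (List String)) : List (String × List String) :=
  (listOfLists.foldl (fun d lists =>
    lists.foldl (fun d names =>
      let name := PySem.Str.split₀ names
      let k := PySem.List.pyGetD name 0 ""
      let d := if d.contains k then d else d.insert k []
      d.modify k [] (fun l => l ++ [PySem.List.pyGetD name 1 ""])) d)
    (PySem.Dict.empty : PySem.Dict String (List String))).items.map
      (fun p => (p.1, PySem.List.sorted p.2 (fun x => x)))

-- ===== PORT B =====
def abstract_names_alt (listOfLists : List (List String)) : List (String × List String) :=
  let pairs := listOfLists.flatMap (fun lists => lists.map PySem.Str.split₀)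
  let keys := PySem.List.dedup (pairs.map (fun p => PySem.List.pyGetD p 0 ""))
  keys.map (fun k => (k,
    PySem.List.sorted
      ((pairs.filter (fun p => PySem.List.pyGetD p 0 "" == k)).map
        (fun p => PySem.List.pyGetD p 1 ""))
      (fun x => x)))

-- ===== PRECONDITION & SPEC =====
-- Python A indexes name[0] and name[1] of every whitespace-split string, so it raises
-- IndexError on any string with fewer than two tokens; Pre_ excludes exactly those.
def Pre_abstract_names (listOfLists : List (List String)) : Prop :=
  ∀ lists ∈ listOfLists, ∀ s ∈ lists, 2 ≤ (PySem.Str.split₀ s).length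
instance (listOfLists : List (List String)) : Decidable (Pre_abstract_names listOfLists) := by unfold Pre_abstract_names; infer_instance
def pvWitness_abstract_names : List (List String) := [["Mike Bell", "Anna Ax"], ["Mike Ab"]]
def Spec_abstract_names (listOfLists : List (List String)) (out : List (String × List String)) : Prop := out = abstract_names_alt listOfLists
instance (listOfLists : List (List String)) (out : List (String × List String)) : Decidable (Spec_abstract_names listOfLists out) := by unfold Spec_abstract_names; infer_instance

-- ===== CLAIM (what is proved, stated in full; the proofs are below) =====
def Claim_equal_abstract_names : Prop := ∀ (listOfLists : List (List String)), Dom_abstract_names listOfLists → Pre_abstract_names listOfLists → Spec_abstract_names listOfLists (abstract_names listOfLists)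

-- ===== LEMMAS AND PROOFS =====

-- A's "if the key is absent insert []" followed by the append is exactly one
-- Dict.modify with default [].
theorem pv_step_eq_modify {κ : Type} [BEq κ] [LawfulBEq κ] (d : PySem.Dict κ (List String))
    (k : κ) (v : String) :
    ((if d.contains k then d else d.insert k []).modify k [] (fun l => l ++ [v]))
      = d.modify k [] (fun l => l ++ [v]) := by
  by_cases h : d.contains k
  · simp [h]
  · rw [if_neg (by simp [h])]
    have h' : ∀ p ∈ d.items, (p.1 == k) = false := by
      intro p hp
      simp only [PySem.Dict.contains, List.any_eq_true, not_exists, not_and,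
        Bool.not_eq_true] at h
      exact h p hp
    apply PySem.Dict.ext
    simp only [PySem.Dict.modify, PySem.Dict.getD_insert_self,
      PySem.Dict.getD_of_not_contains d ([] : List String) (by simpa using h)]
    simp only [PySem.Dict.insert, PySem.Dict.contains] at h ⊢
    rw [if_neg h, if_neg h]
    rw [if_pos (by simp)]
    have hmap : List.map (fun p => if (p.1 == k) = true then (k, ([v] : List String)) else p) d.items = d.items := by
      rw [List.map_congr_left (g := id) (fun p hp => by simp [h' p hp])]
      exact List.map_id d.items
    simp [hmap]

theorem pv_main (L : List (List String)) : abstract_names L = abstract_names_alt L := by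
  simp only [abstract_names, abstract_names_alt]
  have hflat : L.flatMap (fun lists => lists.map PySem.Str.split₀)
      = L.flatten.map PySem.Str.split₀ := by
    simp [List.flatMap_def, List.map_flatten]
  rw [hflat]
  set ps : List (List String) := L.flatten.map PySem.Str.split₀ with hps
  -- A's nested loop is one modify-fold over the flat list of split name-lists
  have h0 : L.foldl (fun d lists =>
      lists.foldl (fun d names =>
        let name := PySem.Str.split₀ names
        let k := PySem.List.pyGetD name 0 ""
        let d := if d.contains k then d else d.insert k []
        d.modify k [] (fun l => l ++ [PySem.List.pyGetD name 1 ""])) d)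
      (PySem.Dict.empty : PySem.Dict String (List String))
      = ps.foldl (fun d p =>
          d.modify (PySem.List.pyGetD p 0 "") [] (fun l => l ++ [PySem.List.pyGetD p 1 ""]))
          PySem.Dict.empty := by
    rw [hps, List.foldl_map, ← List.foldl_flatten]
    apply PySem.List.foldl_congr_mem
    intro d names _
    exact pv_step_eq_modify d _ _
  rw [h0]
  -- view it as a fold over (first token, second token) pairs
  have h1 : ps.foldl (fun d p =>
        d.modify (PySem.List.pyGetD p 0 "") [] (fun l => l ++ [PySem.List.pyGetD p 1 ""]))
        (PySem.Dict.empty : PySem.Dict String (List String))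
      = (ps.map (fun p => (PySem.List.pyGetD p 0 "", PySem.List.pyGetD p 1 ""))).foldl
          (fun d q => d.modify q.1 [] (fun l => l ++ [q.2])) PySem.Dict.empty :=
    (List.foldl_map
      (f := fun p => (PySem.List.pyGetD p 0 "", PySem.List.pyGetD p 1 ""))
      (g := fun d (q : String × String) => d.modify q.1 [] (fun l => l ++ [q.2]))
      (l := ps) (init := PySem.Dict.empty)).symm
  rw [h1]
  set qs : List (String × String) := ps.map (fun p => (PySem.List.pyGetD p 0 "", PySem.List.pyGetD p 1 "")) with hqs
  set d : PySem.Dict String (List String) :=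
    qs.foldl (fun d q => d.modify q.1 [] (fun l => l ++ [q.2])) PySem.Dict.empty with hd
  have hkeys : d.keys = PySem.Set.ofList (qs.map Prod.fst) := by
    rw [hd, PySem.Dict.keys_foldl_modify_key qs Prod.fst [] (fun d q => fun l => l ++ [q.2])]
    simp [PySem.Dict.keys, PySem.Dict.empty, PySem.Set.update_nil_left]
  have hnd : d.keys.Nodup := by rw [hkeys]; exact PySem.Set.nodup_ofList _
  have hgetD : ∀ c, d.getD c [] = (qs.filter (fun q => q.1 == c)).map Prod.snd := by
    intro c
    rw [hd, PySem.Dict.getD_foldl_modify_append qs PySem.Dict.empty c]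
    simp [PySem.Dict.getD_empty]
  rw [PySem.Dict.items_eq_map_keys d hnd [], List.map_map, hkeys]
  have hks : qs.map Prod.fst = ps.map (fun p => PySem.List.pyGetD p 0 "") := by
    simp [hqs]
  rw [hks]
  unfold PySem.List.dedup
  apply List.map_congr_left
  intro c _
  simp only [Function.comp_apply, hgetD c, Prod.mk.injEq, true_and]
  congr 1
  rw [hqs, List.filter_map, List.map_map]
  simp [Function.comp_def]

-- ===== VERDICT (by name: the statement is the Claim_ definition above) =====
theorem abstract_names_spec : Claim_equal_abstract_names := by
  intro L _hdom _hpre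
  exact pv_main L
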